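-- pv_equiv track=rewrite | github.com/YaEtoTui/algorithms | lab_2/page_30_task_6/task_6.py | optimal_distribution
-- ===== SOURCE A (Python) =====
-- income_table = [
--     [8, 10, 11, 12, 18],  # f1(x) - доход для первого предприятия
--     [6, 9, 11, 13, 15],   # f2(x) - доход для второго предприятия
--     [3, 4, 7, 11, 18],    # f3(x) - доход для третьего предприятия
--     [4, 6, 8, 13, 16]     # f4(x) - доход для четвертого предприятия
-- ]
--
-- increment = 40  # Кратность финансирования
--
-- num_enterprises = len(income_table)  # Количество предприятий
--
-- funding_levels = len(income_table[0])  # Количество уровней финансирования для каждого предприятия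
--
-- def optimal_distribution(budget):
--     dp = [[0] * (budget // increment + 1) for _ in range(num_enterprises + 1)]
--     allocation = [[0] * (budget // increment + 1) for _ in range(num_enterprises + 1)]
--
--     for i in range(1, num_enterprises + 1):
--         for j in range(1, budget // increment + 1):
--             current_budget = j * increment
--             dp[i][j] = dp[i-1][j]
--             for k in range(funding_levels):
--                 cost = (k + 1) * increment
--                 if cost <= current_budget:
--                     potential_income = income_table[i-1][k] + dp[i-1][j - (cost // increment)]
--                     if potential_income > dp[i][j]:
--                         dp[i][j] = potential_income
--                         allocation[i][j] = cost
--
--     distribution = [0] * num_enterprises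
--     remaining_budget = budget // increment
--     for i in range(num_enterprises, 0, -1):
--         distribution[i-1] = allocation[i][remaining_budget]
--         remaining_budget -= distribution[i-1] // increment
--
--     return dp[num_enterprises][budget // increment], distribution
-- ===== SOURCE B (Python) =====
-- income_table = [
--     [8, 10, 11, 12, 18],
--     [6, 9, 11, 13, 15],
--     [3, 4, 7, 11, 18],
--     [4, 6, 8, 13, 16]
-- ]
--
-- increment = 40
--
-- num_enterprises = len(income_table)
--
-- funding_levels = len(income_table[0])
--
--
-- def best_option(sol, i, b):
--     # best (income, distribution) for budget b once enterprise i may also be funded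
--     value, dist = sol[b][0], sol[b][1] + [0]
--     for k in range(funding_levels):
--         if k + 1 <= b:
--             v = income_table[i][k] + sol[b - k - 1][0]
--             if v > value:
--                 value, dist = v, sol[b - k - 1][1] + [(k + 1) * increment]
--     return value, dist
--
--
-- def optimal_distribution(budget):
--     units = budget // increment
--     # sol[b] = best (income, distribution) using the enterprises seen so far with b increments
--     sol = [(0, [])] * (units + 1)
--     for i in range(num_enterprises):
--         sol = [best_option(sol, i, b) for b in range(units + 1)]
--     income, dist = sol[units]
--     return income, dist
-- ===== Notes on version B (the rewrite author's own statement) =====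
-- stated objective: alternative
-- what changed: A fills a dp table plus a separate allocation table and then reconstructs the distribution by a backward pass over the allocation table; B runs a single forward knapsack whose per-budget states carry the (income, distribution) pair itself, so there is no allocation table and no reconstruction pass. Pre_ excludes negative budgets, on which A raises IndexError (B raises too).
import Mathlib
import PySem

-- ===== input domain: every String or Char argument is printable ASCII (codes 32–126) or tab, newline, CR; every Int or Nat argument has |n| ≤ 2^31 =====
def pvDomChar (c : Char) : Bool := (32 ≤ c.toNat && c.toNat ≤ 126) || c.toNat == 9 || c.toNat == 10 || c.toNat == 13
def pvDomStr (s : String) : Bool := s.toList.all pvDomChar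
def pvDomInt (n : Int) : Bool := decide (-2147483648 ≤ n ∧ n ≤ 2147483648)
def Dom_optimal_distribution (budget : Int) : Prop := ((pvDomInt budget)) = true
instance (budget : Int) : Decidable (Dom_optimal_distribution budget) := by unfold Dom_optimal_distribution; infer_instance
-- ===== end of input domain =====

-- B replaces A's dp+allocation tables and backward reconstruction pass by a single forward
-- knapsack whose per-budget states carry the (income, distribution) pair (objective: alternative).

-- shared module-level constant income_table
def pvIncome : List (List Int) := [[8, 10, 11, 12, 18], [6, 9, 11, 13, 15], [3, 4, 7, 11, 18], [4, 6, 8, 13, 16]]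

-- xs[i][j] for the in-range non-negative indices both programs use (pyGetD is exact there)
def pvGet2 (t : List (List Int)) (i j : Int) : Int := PySem.List.pyGetD (PySem.List.pyGetD t i []) j 0

-- A's DP/allocation tables are arrays of arrays (Python lists are arrays); cell reads/writes are
-- exact for the in-range non-negative indices the loops use
def pvTGet (t : Array (Array Int)) (i j : Int) : Int := (t.getD i.toNat #[]).getD j.toNat 0

-- dp[i][j] = v
def pvTSet (t : Array (Array Int)) (i j : Int) (v : Int) : Array (Array Int) :=
  t.modify i.toNat (fun row => row.setIfInBounds j.toNat v)

-- ===== PORT A =====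
-- innermost k-loop body: cost = (k+1)*increment; update dp[i][j], allocation[i][j] on strict improvement
def pvAInner (i j : Int) (st : Array (Array Int) × Array (Array Int)) (k : Int) :
    Array (Array Int) × Array (Array Int) :=
  if (k + 1) * 40 ≤ j * 40 then
    let pot := pvGet2 pvIncome (i - 1) k +
      pvTGet st.1 (i - 1) (j - PySem.Int.floordiv ((k + 1) * 40) 40)
    if pvTGet st.1 i j < pot then (pvTSet st.1 i j pot, pvTSet st.2 i j ((k + 1) * 40)) else st
  else st

-- body of the j-loop: dp[i][j] = dp[i-1][j], then the k-loop
def pvAMid (i : Int) (st : Array (Array Int) × Array (Array Int)) (j : Int) :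
    Array (Array Int) × Array (Array Int) :=
  (PySem.List.pyRange 0 5 1).foldl (pvAInner i j) (pvTSet st.1 i j (pvTGet st.1 (i - 1) j), st.2)

-- body of the i-loop: for j in range(1, budget//increment + 1)
def pvAOuter (J : Int) (st : Array (Array Int) × Array (Array Int)) (i : Int) :
    Array (Array Int) × Array (Array Int) :=
  (PySem.List.pyRange 1 (J + 1) 1).foldl (pvAMid i) st

def optimal_distribution (budget : Int) : Int × List Int :=
  let J := PySem.Int.floordiv budget 40
  let dp := Array.replicate 5 (Array.replicate (J + 1).toNat (0 : Int))
  let al := Array.replicate 5 (Array.replicate (J + 1).toNat (0 : Int))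
  let st := (PySem.List.pyRange 1 5 1).foldl (pvAOuter J) (dp, al)
  let fin := (PySem.List.pyRange 4 0 (-1)).foldl
    (fun (s : List Int × Int) i =>
      let d := pvTGet st.2 i s.2
      (s.1.set (i - 1).toNat d, s.2 - PySem.Int.floordiv d 40))
    (List.replicate 4 (0 : Int), J)
  (pvTGet st.1 4 J, fin.1)

-- ===== PORT B =====
-- sol[b] (in-range non-negative b; pyGetD is exact there)
def altCell (sol : List (Int × List Int)) (b : Int) : Int × List Int :=
  PySem.List.pyGetD sol b (0, [])

-- python helper best_option(sol, i, b)
def altBestOption (sol : List (Int × List Int)) (i b : Int) : Int × List Int :=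
  (PySem.List.pyRange 0 5 1).foldl (fun s k =>
    if k + 1 ≤ b then
      if s.1 < pvGet2 pvIncome i k + (altCell sol (b - k - 1)).1 then
        (pvGet2 pvIncome i k + (altCell sol (b - k - 1)).1,
         (altCell sol (b - k - 1)).2 ++ [(k + 1) * 40])
      else s
    else s) ((altCell sol b).1, (altCell sol b).2 ++ [0])

def optimal_distribution_alt (budget : Int) : Int × List Int :=
  let units := PySem.Int.floordiv budget 40
  let sol0 : List (Int × List Int) := PySem.List.pyRepeat [((0 : Int), ([] : List Int))] (units + 1)
  let sol := (PySem.List.pyRange 0 4 1).foldl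
    (fun sol i => (PySem.List.pyRange 0 (units + 1) 1).map (fun b => altBestOption sol i b)) sol0
  altCell sol units

-- ===== PRECONDITION & SPEC =====
-- Both programs raise IndexError for negative budget (empty tables indexed at a negative position);
-- Pre_ keeps exactly the budgets on which A returns.
def Pre_optimal_distribution (budget : Int) : Prop := 0 ≤ budget
instance (budget : Int) : Decidable (Pre_optimal_distribution budget) := by
  unfold Pre_optimal_distribution; infer_instance

def pvWitness_optimal_distribution : Int := 120

def Spec_optimal_distribution (budget : Int) (out : Int × List Int) : Prop :=
  out = optimal_distribution_alt budget
instance (budget : Int) (out : Int × List Int) : Decidable (Spec_optimal_distribution budget out) := by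
  unfold Spec_optimal_distribution; infer_instance

-- ===== CLAIM (what is proved, stated in full; the proofs are below) =====
def Claim_equal_optimal_distribution : Prop := ∀ (budget : Int), Dom_optimal_distribution budget →
  Pre_optimal_distribution budget → Spec_optimal_distribution budget (optimal_distribution budget)

-- ===== LEMMAS AND PROOFS =====

def gN (t : Array (Array Int)) (q j : Nat) : Int := (t.getD q #[]).getD j 0
def sN (t : Array (Array Int)) (q j : Nat) (v : Int) : Array (Array Int) :=
  t.modify q (fun row => row.setIfInBounds j v)

theorem pvTGet_eq (t : Array (Array Int)) (i j : Int) (hi : 0 ≤ i) (hj : 0 ≤ j) :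
    pvTGet t i j = gN t i.toNat j.toNat := rfl

theorem pvTSet_eq (t : Array (Array Int)) (i j : Int) (v : Int) (hi : 0 ≤ i) :
    pvTSet t i j v = sN t i.toNat j.toNat v := rfl

theorem sN_length (t : Array (Array Int)) (q j : Nat) (v : Int) : (sN t q j v).size = t.size := by
  simp [sN]

theorem sN_row (t : Array (Array Int)) (q j : Nat) (v : Int) (q' : Nat) :
    (sN t q j v).getD q' #[] =
      if q = q' ∧ q < t.size then (t.getD q #[]).setIfInBounds j v else t.getD q' #[] := by
  unfold sN
  rw [Array.getD_eq_getD_getElem?, Array.getElem?_modify]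
  by_cases hq : q = q'
  · subst hq
    by_cases hlt : q < t.size
    · rw [if_pos rfl, if_pos ⟨rfl, hlt⟩, Array.getElem?_eq_getElem hlt]
      rw [show t.getD q #[] = t[q] from by rw [Array.getD_eq_getD_getElem?, Array.getElem?_eq_getElem hlt]; rfl]
      rfl
    · rw [if_pos rfl, if_neg (by tauto), Array.getElem?_eq_none (by omega)]
      rw [Array.getD_eq_getD_getElem?, Array.getElem?_eq_none (by omega)]
      rfl
  · rw [if_neg hq, if_neg (by tauto), Array.getD_eq_getD_getElem?]

theorem sN_rowlen (t : Array (Array Int)) (q j : Nat) (v : Int) (q' : Nat) :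
    ((sN t q j v).getD q' #[]).size = (t.getD q' #[]).size := by
  rw [sN_row]
  by_cases h : q = q' ∧ q < t.size
  · rw [if_pos h, Array.size_setIfInBounds, h.1]
  · rw [if_neg h]

theorem gN_sN_same (t : Array (Array Int)) (q j : Nat) (v : Int)
    (hq : q < t.size) (hj : j < (t.getD q #[]).size) :
    gN (sN t q j v) q j = v := by
  unfold gN
  rw [sN_row, if_pos ⟨rfl, hq⟩, Array.getD_eq_getD_getElem?, Array.getElem?_setIfInBounds,
    if_pos rfl, if_pos hj]
  rfl

theorem gN_sN_ne (t : Array (Array Int)) (q j : Nat) (v : Int) (q' j' : Nat)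
    (h : q' ≠ q ∨ j' ≠ j) : gN (sN t q j v) q' j' = gN t q' j' := by
  unfold gN
  rw [sN_row]
  by_cases hc : q = q' ∧ q < t.size
  · obtain ⟨rfl, hlt⟩ := hc
    have hj : j' ≠ j := by tauto
    rw [if_pos ⟨rfl, hlt⟩, Array.getD_eq_getD_getElem?, Array.getElem?_setIfInBounds,
      if_neg (by omega), ← Array.getD_eq_getD_getElem?]
  · rw [if_neg hc]

theorem sN_sN (t : Array (Array Int)) (q j : Nat) (v w : Int) (hq : q < t.size) :
    sN (sN t q j v) q j w = sN t q j w := by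
  apply Array.ext_getElem?
  intro i
  unfold sN
  simp only [Array.getElem?_modify]
  by_cases hqi : q = i
  · subst hqi
    simp only [eq_self_iff_true, if_true]
    rw [Array.getElem?_eq_getElem hq]
    simp only [Option.map_some]
    congr 1
    apply Array.ext_getElem?
    intro m
    simp only [Array.getElem?_setIfInBounds, Array.size_setIfInBounds]
    by_cases hm : j = m
    · subst hm
      by_cases hin : j < t[q].size
      · simp [hin]
      · simp [hin]
    · simp [hm]
  · simp only [if_neg hqi]

theorem sN_self (t : Array (Array Int)) (q j : Nat)
    (hj : j < (t.getD q #[]).size) (h : gN t q j = 0) :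
    sN t q j 0 = t := by
  apply Array.ext_getElem?
  intro i
  unfold sN
  rw [Array.getElem?_modify]
  by_cases hqi : q = i
  · subst hqi
    simp only [eq_self_iff_true, if_true]
    rcases lt_or_ge q t.size with hlt | hge
    · rw [Array.getElem?_eq_getElem hlt]
      simp only [Option.map_some]
      have hrow : t.getD q #[] = t[q] := by
        rw [Array.getD_eq_getD_getElem?, Array.getElem?_eq_getElem hlt]; rfl
      rw [hrow] at hj
      have hcell : t[q][j] = 0 := by
        unfold gN at h
        rw [hrow, Array.getD_eq_getD_getElem?, Array.getElem?_eq_getElem hj] at h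
        exact h
      congr 1
      apply Array.ext_getElem?
      intro m
      rw [Array.getElem?_setIfInBounds]
      by_cases hm : j = m
      · subst hm
        rw [if_pos rfl, if_pos hj, Array.getElem?_eq_getElem hj, hcell]
      · rw [if_neg hm]
    · rw [Array.getElem?_eq_none (by omega)]
      rfl
  · rw [if_neg hqi]

-- generic: the strict-improvement pair fold computes (running max, tag of first achiever);
-- the tag type α is generic so the same lemma covers A's stored cost and B's carried list
theorem pairfold_spec {α : Type} (cond : Int → Prop) [DecidablePred cond] (pot : Int → Int) (tag : Int → α) :
    ∀ (ks : List Int) (c : Int) (a : α),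
      (ks.foldl (fun s k => if cond k then (if s.1 < pot k then (pot k, tag k) else s) else s) (c, a)).1
        = ks.foldl (fun m k => if cond k then max m (pot k) else m) c ∧
      c ≤ ks.foldl (fun m k => if cond k then max m (pot k) else m) c ∧
      (ks.foldl (fun m k => if cond k then max m (pot k) else m) c = c →
        (ks.foldl (fun s k => if cond k then (if s.1 < pot k then (pot k, tag k) else s) else s) (c, a)) = (c, a)) ∧
      (ks.foldl (fun m k => if cond k then max m (pot k) else m) c ≠ c →
        ∃ k, ks.find? (fun k => decide (cond k) &&
              decide (pot k = ks.foldl (fun m k => if cond k then max m (pot k) else m) c)) = some k ∧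
          (ks.foldl (fun s k => if cond k then (if s.1 < pot k then (pot k, tag k) else s) else s) (c, a)).2 = tag k) := by
  intro ks
  induction ks with
  | nil => intro c a; refine ⟨rfl, le_refl _, fun _ => rfl, fun h => absurd rfl h⟩
  | cons k ks ih =>
    intro c a
    by_cases hc : cond k
    · by_cases hlt : c < pot k
      · -- update fires
        have hmax : max c (pot k) = pot k := max_eq_right hlt.le
        obtain ⟨h1, h2, h3, h4⟩ := ih (pot k) (tag k)
        simp only [List.foldl_cons, if_pos hc, if_pos hlt, hmax]
        refine ⟨h1, le_trans hlt.le h2, fun hM => absurd hM (by omega), ?_⟩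
        · intro _
          rw [List.find?_cons]
          by_cases hpk : pot k = ks.foldl (fun m k => if cond k then max m (pot k) else m) (pot k)
          · have : (decide (cond k) && decide (pot k = ks.foldl (fun m k => if cond k then max m (pot k) else m) (pot k))) = true := by
              rw [decide_eq_true hc, decide_eq_true hpk, Bool.and_self]
            rw [this]
            exact ⟨k, rfl, by rw [(h3 hpk.symm)]⟩
          · have : (decide (cond k) && decide (pot k = ks.foldl (fun m k => if cond k then max m (pot k) else m) (pot k))) = false := by
              rw [decide_eq_false hpk, Bool.and_false]
            rw [this]
            exact h4 (fun h => hpk h.symm)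
      · -- pot k ≤ c, no update
        have hmax : max c (pot k) = c := max_eq_left (by omega)
        obtain ⟨h1, h2, h3, h4⟩ := ih c a
        simp only [List.foldl_cons, if_pos hc, if_neg hlt, hmax]
        refine ⟨h1, h2, h3, ?_⟩
        intro hM
        rw [List.find?_cons]
        have hpk : pot k ≠ ks.foldl (fun m k => if cond k then max m (pot k) else m) c := by
          intro h; apply hM; omega
        have : (decide (cond k) && decide (pot k = ks.foldl (fun m k => if cond k then max m (pot k) else m) c)) = false := by
          rw [decide_eq_false hpk, Bool.and_false]
        rw [this]
        exact h4 hM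
    · simp only [List.foldl_cons, if_neg hc]
      obtain ⟨h1, h2, h3, h4⟩ := ih c a
      refine ⟨h1, h2, h3, ?_⟩
      intro hM
      rw [List.find?_cons]
      have : (decide (cond k) && decide (pot k = ks.foldl (fun m k => if cond k then max m (pot k) else m) c)) = false := by
        rw [decide_eq_false hc, Bool.false_and]
      rw [this]
      exact h4 hM

theorem pyRange05 : PySem.List.pyRange 0 5 1 = [0, 1, 2, 3, 4] := by decide
theorem pyRange15 : PySem.List.pyRange 1 5 1 = [1, 2, 3, 4] := by decide
theorem pyRange04 : PySem.List.pyRange 0 4 1 = [0, 1, 2, 3] := by decide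

-- bestV n b = max income using the first n enterprises with b budget increments
def bestV : Nat → Int → Int
  | 0, _ => 0
  | n + 1, b =>
      (PySem.List.pyRange 0 5 1).foldl
        (fun r k => if k + 1 ≤ b then max r (pvGet2 pvIncome (n : Int) k + bestV n (b - k - 1)) else r)
        (bestV n b)

-- distL n b = the distribution (entries for enterprises 1..n, in order) the strict-improvement
-- rule produces at (n, b); built by the same pair fold with the carried-list tag
def distL : Nat → Int → List Int
  | 0, _ => []
  | n + 1, b =>
      ((PySem.List.pyRange 0 5 1).foldl (fun s k =>
        if k + 1 ≤ b then
          if s.1 < pvGet2 pvIncome (n : Int) k + bestV n (b - k - 1) then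
            (pvGet2 pvIncome (n : Int) k + bestV n (b - k - 1), distL n (b - k - 1) ++ [(k + 1) * 40])
          else s
        else s) (bestV n b, distL n b ++ [0])).2

theorem bestV_nonpos (n : Nat) (b : Int) (hb : b ≤ 0) : bestV n b = 0 := by
  induction n with
  | zero => rfl
  | succ n ih =>
    simp only [bestV, pyRange05, List.foldl_cons, List.foldl_nil]
    rw [if_neg (by omega), if_neg (by omega), if_neg (by omega), if_neg (by omega), if_neg (by omega)]
    exact ih

-- A's stored cost at (n, b): second component of the pair fold with the cost tag
def pairF (n : Nat) (b : Int) : Int × Int :=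
  (PySem.List.pyRange 0 5 1).foldl
    (fun s k => if k + 1 ≤ b then
        (if s.1 < pvGet2 pvIncome (n : Int) k + bestV n (b - k - 1)
         then (pvGet2 pvIncome (n : Int) k + bestV n (b - k - 1), (k + 1) * 40) else s)
      else s)
    (bestV n b, 0)

def achoice : Nat → Int → Int
  | 0, _ => 0
  | n + 1, b => (pairF n b).2

theorem bestV_succ (n : Nat) (b : Int) :
    bestV (n + 1) b = (PySem.List.pyRange 0 5 1).foldl
      (fun m k => if k + 1 ≤ b then max m (pvGet2 pvIncome (n : Int) k + bestV n (b - k - 1)) else m)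
      (bestV n b) := rfl

theorem pairF_fst (n : Nat) (b : Int) : (pairF n b).1 = bestV (n + 1) b := by
  rw [bestV_succ]
  exact (pairfold_spec (fun k => k + 1 ≤ b) (fun k => pvGet2 pvIncome (n : Int) k + bestV n (b - k - 1))
    (fun k => (k + 1) * 40) (PySem.List.pyRange 0 5 1) (bestV n b) 0).1

-- both tag instances pick the same branch (the find? expression does not mention the tag):
-- either tie (skip) or the same first achieving k
theorem choice_spec (n : Nat) (b : Int) :
    (bestV (n + 1) b = bestV n b ∧ achoice (n + 1) b = 0 ∧ distL (n + 1) b = distL n b ++ [0]) ∨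
    (bestV (n + 1) b ≠ bestV n b ∧ ∃ k,
      achoice (n + 1) b = (k + 1) * 40 ∧ distL (n + 1) b = distL n (b - k - 1) ++ [(k + 1) * 40] ∧
      0 ≤ k ∧ k + 1 ≤ b) := by
  obtain ⟨h1, h2, h3, h4⟩ := pairfold_spec (fun k => k + 1 ≤ b)
    (fun k => pvGet2 pvIncome (n : Int) k + bestV n (b - k - 1))
    (fun k => (k + 1) * 40) (PySem.List.pyRange 0 5 1) (bestV n b) 0
  obtain ⟨g1, g2, g3, g4⟩ := pairfold_spec (fun k => k + 1 ≤ b)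
    (fun k => pvGet2 pvIncome (n : Int) k + bestV n (b - k - 1))
    (fun k => distL n (b - k - 1) ++ [(k + 1) * 40]) (PySem.List.pyRange 0 5 1)
    (bestV n b) (distL n b ++ [0])
  rw [← bestV_succ] at h3 h4 g3 g4
  by_cases hM : bestV (n + 1) b = bestV n b
  · refine Or.inl ⟨hM, ?_, ?_⟩
    · simp only [achoice, pairF, h3 hM]
    · simp only [distL]
      rw [g3 hM]
  · obtain ⟨k, hfind, htag⟩ := h4 hM
    obtain ⟨k', hfind', htag'⟩ := g4 hM
    rw [hfind] at hfind'
    obtain rfl : k = k' := by injection hfind'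
    refine Or.inr ⟨hM, k, ?_, ?_, ?_, ?_⟩
    · simp only [achoice, pairF]; exact htag
    · simp only [distL]; exact htag'
    · have := List.mem_of_find?_eq_some hfind
      rw [pyRange05] at this
      fin_cases this <;> norm_num
    · have := List.find?_some hfind
      simp only [Bool.and_eq_true, decide_eq_true_eq] at this
      exact this.1

theorem achoice_nonpos (n : Nat) (b : Int) (hb : b ≤ 0) : achoice n b = 0 := by
  cases n with
  | zero => rfl
  | succ n =>
    simp only [achoice, pairF, pyRange05, List.foldl_cons, List.foldl_nil]
    rw [if_neg (by omega), if_neg (by omega), if_neg (by omega), if_neg (by omega), if_neg (by omega)]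

def TShape (J : Int) (t : Array (Array Int)) : Prop :=
  t.size = 5 ∧ ∀ q : Nat, q < 5 → (t.getD q #[]).size = (J + 1).toNat

theorem floordiv_mul40 (c : Int) : PySem.Int.floordiv (c * 40) 40 = c := by
  rw [PySem.Int.floordiv_eq_ediv_of_pos (by norm_num)]
  exact Int.mul_ediv_cancel _ (by norm_num)

theorem floordiv_zero40 : PySem.Int.floordiv 0 40 = 0 := by
  rw [PySem.Int.floordiv_eq_ediv_of_pos (by norm_num)]
  exact Int.zero_ediv 40

theorem pvAInner_fold (r : Nat) (hr : r < 4) (J j : Int) (hJ : 0 ≤ J) (hj1 : 1 ≤ j) (hjJ : j ≤ J)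
    (dp al : Array (Array Int)) (hdp : TShape J dp) (hal : TShape J al)
    (hrow : ∀ j' : Int, 0 ≤ j' → j' ≤ J → pvTGet dp (r : Int) j' = bestV r j') :
    ∀ (ks : List Int), (∀ k ∈ ks, 0 ≤ k) → ∀ (c a : Int),
      ks.foldl (pvAInner ((r : Int) + 1) j) (pvTSet dp ((r : Int) + 1) j c, pvTSet al ((r : Int) + 1) j a)
      = (pvTSet dp ((r : Int) + 1) j
           (ks.foldl (fun s k => if k + 1 ≤ j then
              (if s.1 < pvGet2 pvIncome (r : Int) k + bestV r (j - k - 1)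
               then (pvGet2 pvIncome (r : Int) k + bestV r (j - k - 1), (k + 1) * 40) else s)
             else s) (c, a)).1,
         pvTSet al ((r : Int) + 1) j
           (ks.foldl (fun s k => if k + 1 ≤ j then
              (if s.1 < pvGet2 pvIncome (r : Int) k + bestV r (j - k - 1)
               then (pvGet2 pvIncome (r : Int) k + bestV r (j - k - 1), (k + 1) * 40) else s)
             else s) (c, a)).2) := by
  intro ks
  induction ks with
  | nil => intro _ c a; rfl
  | cons k ks ih =>
    intro hks c a
    have hk0 : (0 : Int) ≤ k := hks k (List.mem_cons_self)
    have hi0 : (0 : Int) ≤ (r : Int) + 1 := by omega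
    have hj0 : (0 : Int) ≤ j := by omega
    have htoN : ((r : Int) + 1).toNat = r + 1 := by omega
    have hdplen : dp.size = 5 := hdp.1
    have hallen : al.size = 5 := hal.1
    have hrowlen : (dp.getD (r + 1) #[]).size = (J + 1).toNat := hdp.2 (r + 1) (by omega)
    have harowlen : (al.getD (r + 1) #[]).size = (J + 1).toNat := hal.2 (r + 1) (by omega)
    have hjN : j.toNat < (J + 1).toNat := by omega
    -- the cell currently holds c
    have hcell : pvTGet (pvTSet dp ((r : Int) + 1) j c) ((r : Int) + 1) j = c := by
      rw [pvTSet_eq _ _ _ _ hi0, pvTGet_eq _ _ _ hi0 hj0, htoN]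
      exact gN_sN_same _ _ _ _ (by omega) (by rw [hrowlen]; exact hjN)
    simp only [List.foldl_cons]
    by_cases hA : (k + 1) * 40 ≤ j * 40
    · have hkj : k + 1 ≤ j := by omega
      -- the read of row r sees the original dp
      have hread : pvTGet (pvTSet dp ((r : Int) + 1) j c) ((r : Int))
          (j - PySem.Int.floordiv ((k + 1) * 40) 40) = bestV r (j - k - 1) := by
        rw [floordiv_mul40]
        rw [pvTSet_eq _ _ _ _ hi0, pvTGet_eq _ _ _ (by omega) (by omega), htoN]
        rw [gN_sN_ne _ _ _ _ _ _ (Or.inl (by omega))]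
        rw [← pvTGet_eq _ _ _ (by omega) (by omega)]
        rw [hrow _ (by omega) (by omega)]
        congr 1
        omega
      simp only [pvAInner, if_pos hA, show ((r : Int) + 1 - 1) = (r : Int) from by ring, hread, hcell, if_pos hkj]
      by_cases himp : c < pvGet2 pvIncome (r : Int) k + bestV r (j - k - 1)
      · rw [if_pos himp, if_pos himp]
        have hw1 : pvTSet (pvTSet dp ((r : Int) + 1) j c) ((r : Int) + 1) j
            (pvGet2 pvIncome (r : Int) k + bestV r (j - k - 1))
            = pvTSet dp ((r : Int) + 1) j (pvGet2 pvIncome (r : Int) k + bestV r (j - k - 1)) := by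
          rw [pvTSet_eq _ _ _ _ hi0, pvTSet_eq _ _ _ _ hi0, pvTSet_eq _ _ _ _ hi0, htoN]
          exact sN_sN _ _ _ _ _ (by omega)
        have hw2 : pvTSet (pvTSet al ((r : Int) + 1) j a) ((r : Int) + 1) j ((k + 1) * 40)
            = pvTSet al ((r : Int) + 1) j ((k + 1) * 40) := by
          rw [pvTSet_eq _ _ _ _ hi0, pvTSet_eq _ _ _ _ hi0, pvTSet_eq _ _ _ _ hi0, htoN]
          exact sN_sN _ _ _ _ _ (by omega)
        rw [hw1, hw2]
        exact ih (fun k hk => hks k (List.mem_cons_of_mem _ hk)) _ _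
      · rw [if_neg himp, if_neg himp]
        exact ih (fun k hk => hks k (List.mem_cons_of_mem _ hk)) _ _
    · have hkj : ¬ (k + 1 ≤ j) := by omega
      simp only [pvAInner, if_neg hA, if_neg hkj]
      exact ih (fun k hk => hks k (List.mem_cons_of_mem _ hk)) _ _

theorem pvAMid_spec (r : Nat) (hr : r < 4) (J j : Int) (hJ : 0 ≤ J) (hj1 : 1 ≤ j) (hjJ : j ≤ J)
    (dp al : Array (Array Int)) (hdp : TShape J dp) (hal : TShape J al)
    (hrow : ∀ j' : Int, 0 ≤ j' → j' ≤ J → pvTGet dp (r : Int) j' = bestV r j')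
    (hacell : pvTGet al ((r : Int) + 1) j = 0) :
    pvAMid ((r : Int) + 1) (dp, al) j
      = (pvTSet dp ((r : Int) + 1) j (bestV (r + 1) j),
         pvTSet al ((r : Int) + 1) j (achoice (r + 1) j)) := by
  have hi0 : (0 : Int) ≤ (r : Int) + 1 := by omega
  have hj0 : (0 : Int) ≤ j := by omega
  have htoN : ((r : Int) + 1).toNat = r + 1 := by omega
  have halset : pvTSet al ((r : Int) + 1) j 0 = al := by
    rw [pvTSet_eq _ _ _ _ hi0, htoN]
    apply sN_self
    · rw [hal.2 (r + 1) (by omega)]; omega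
    · rw [pvTGet_eq _ _ _ hi0 hj0, htoN] at hacell; exact hacell
  have hinit : pvTGet dp ((r : Int) + 1 - 1) j = bestV r j := by
    rw [show ((r : Int) + 1 - 1) = (r : Int) by ring]
    exact hrow j hj0 hjJ
  unfold pvAMid
  simp only [hinit]
  rw [← halset]
  rw [pvAInner_fold r hr J j hJ hj1 hjJ dp al hdp hal hrow (PySem.List.pyRange 0 5 1)
    (by intro k hk; rw [PySem.List.mem_pyRange_one] at hk; omega) (bestV r j) 0]
  have h1 : (pairF r j).1 = bestV (r + 1) j := pairF_fst r j
  have h2 : (pairF r j).2 = achoice (r + 1) j := rfl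
  rw [show ((PySem.List.pyRange 0 5 1).foldl (fun s k => if k + 1 ≤ j then
              (if s.1 < pvGet2 pvIncome (r : Int) k + bestV r (j - k - 1)
               then (pvGet2 pvIncome (r : Int) k + bestV r (j - k - 1), (k + 1) * 40) else s)
             else s) (bestV r j, 0)) = pairF r j from rfl, h1, h2]
  have hw : pvTSet (pvTSet al ((r : Int) + 1) j 0) ((r : Int) + 1) j (achoice (r + 1) j)
      = pvTSet al ((r : Int) + 1) j (achoice (r + 1) j) := by
    rw [pvTSet_eq _ _ _ _ hi0, pvTSet_eq _ _ _ _ hi0, pvTSet_eq _ _ _ _ hi0, htoN]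
    exact sN_sN _ _ _ _ _ (by rw [hal.1]; omega)
  rw [hw]

theorem pvARow_spec (r : Nat) (hr : r < 4) (J : Int) (hJ : 0 ≤ J)
    (dp al : Array (Array Int)) (hdp : TShape J dp) (hal : TShape J al)
    (hrow : ∀ j' : Int, 0 ≤ j' → j' ≤ J → pvTGet dp (r : Int) j' = bestV r j')
    (hcur : ∀ j' : Int, 0 ≤ j' → j' ≤ J →
      pvTGet dp ((r : Int) + 1) j' = 0 ∧ pvTGet al ((r : Int) + 1) j' = 0) :
    ∀ m : Nat, (m : Int) ≤ J → ∃ dp' al',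
      (PySem.List.pyRange 1 ((m : Int) + 1) 1).foldl (pvAMid ((r : Int) + 1)) (dp, al) = (dp', al') ∧
      TShape J dp' ∧ TShape J al' ∧
      (∀ q : Nat, q < 5 → q ≠ r + 1 → ∀ j : Int, 0 ≤ j → j ≤ J →
        pvTGet dp' (q : Int) j = pvTGet dp (q : Int) j ∧ pvTGet al' (q : Int) j = pvTGet al (q : Int) j) ∧
      (∀ j : Int, 0 ≤ j → j ≤ J →
        (j ≤ (m : Int) → pvTGet dp' ((r : Int) + 1) j = bestV (r + 1) j ∧
            pvTGet al' ((r : Int) + 1) j = achoice (r + 1) j) ∧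
        ((m : Int) < j → pvTGet dp' ((r : Int) + 1) j = 0 ∧ pvTGet al' ((r : Int) + 1) j = 0)) := by
  intro m
  induction m with
  | zero =>
    intro _
    refine ⟨dp, al, by rw [PySem.List.pyRange_one_eq_nil (by norm_num)]; rfl, hdp, hal,
      fun q _ _ j _ _ => ⟨rfl, rfl⟩, fun j hj0 hjJ => ⟨fun hj => ?_, fun hj => (hcur j hj0 hjJ)⟩⟩
    have hz : j = 0 := by omega
    subst hz
    rw [bestV_nonpos (r + 1) 0 (by omega), achoice_nonpos (r + 1) 0 (by omega)]
    exact hcur 0 (by omega) hjJ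
  | succ m ih =>
    intro hm
    have hmJ : (m : Int) + 1 ≤ J := by push_cast at hm; omega
    obtain ⟨dp', al', hfold, hdp', hal', hunch, hrow'⟩ := ih (by omega)
    have hsplit : PySem.List.pyRange 1 (((m : Nat) + 1 : Nat) + 1 : Int) 1
        = PySem.List.pyRange 1 ((m : Int) + 1) 1 ++ [(m : Int) + 1] := by
      have := PySem.List.pyRange_one_succ_right (a := 1) (b := (m : Int) + 1) (by omega)
      push_cast
      push_cast at this
      rw [← this]
    have hmid : pvAMid ((r : Int) + 1) (dp', al') ((m : Int) + 1)
        = (pvTSet dp' ((r : Int) + 1) ((m : Int) + 1) (bestV (r + 1) ((m : Int) + 1)),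
           pvTSet al' ((r : Int) + 1) ((m : Int) + 1) (achoice (r + 1) ((m : Int) + 1))) :=
      pvAMid_spec r hr J ((m : Int) + 1) hJ (by omega) hmJ dp' al' hdp' hal'
        (fun j' h0 hJ' => by
          rw [(hunch r (by omega) (by omega) j' h0 hJ').1]
          exact hrow j' h0 hJ')
        ((hrow' ((m : Int) + 1) (by omega) hmJ).2 (by omega)).2
    have hi0 : (0 : Int) ≤ (r : Int) + 1 := by omega
    have htoN : ((r : Int) + 1).toNat = r + 1 := by omega
    have hjm0 : (0 : Int) ≤ (m : Int) + 1 := by omega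
    have hdlen : dp'.size = 5 := hdp'.1
    have hallen : al'.size = 5 := hal'.1
    have hrl : (dp'.getD (r + 1) #[]).size = (J + 1).toNat := hdp'.2 (r + 1) (by omega)
    have harl : (al'.getD (r + 1) #[]).size = (J + 1).toNat := hal'.2 (r + 1) (by omega)
    refine ⟨pvTSet dp' ((r : Int) + 1) ((m : Int) + 1) (bestV (r + 1) ((m : Int) + 1)),
            pvTSet al' ((r : Int) + 1) ((m : Int) + 1) (achoice (r + 1) ((m : Int) + 1)),
            ?_, ?_, ?_, ?_, ?_⟩
    · rw [hsplit, List.foldl_append, hfold]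
      simp only [List.foldl_cons, List.foldl_nil]
      exact hmid
    · constructor
      · rw [pvTSet_eq _ _ _ _ hi0, sN_length, hdlen]
      · intro q hq
        rw [pvTSet_eq _ _ _ _ hi0, sN_rowlen]
        exact hdp'.2 q hq
    · constructor
      · rw [pvTSet_eq _ _ _ _ hi0, sN_length, hallen]
      · intro q hq
        rw [pvTSet_eq _ _ _ _ hi0, sN_rowlen]
        exact hal'.2 q hq
    · intro q hq hqne j hj0 hjJ
      have h1 : pvTGet (pvTSet dp' ((r : Int) + 1) ((m : Int) + 1) (bestV (r + 1) ((m : Int) + 1))) (q : Int) j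
          = pvTGet dp' (q : Int) j := by
        rw [pvTSet_eq _ _ _ _ hi0, pvTGet_eq _ _ _ (by omega) hj0, htoN,
          gN_sN_ne _ _ _ _ _ _ (Or.inl (by omega)), ← pvTGet_eq _ _ _ (by omega) hj0]
      have h2 : pvTGet (pvTSet al' ((r : Int) + 1) ((m : Int) + 1) (achoice (r + 1) ((m : Int) + 1))) (q : Int) j
          = pvTGet al' (q : Int) j := by
        rw [pvTSet_eq _ _ _ _ hi0, pvTGet_eq _ _ _ (by omega) hj0, htoN,
          gN_sN_ne _ _ _ _ _ _ (Or.inl (by omega)), ← pvTGet_eq _ _ _ (by omega) hj0]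
      rw [h1, h2]
      exact hunch q hq hqne j hj0 hjJ
    · intro j hj0 hjJ
      by_cases hje : j = (m : Int) + 1
      · subst hje
        constructor
        · intro _
          constructor
          · rw [pvTSet_eq _ _ _ _ hi0, pvTGet_eq _ _ _ hi0 hjm0, htoN]
            exact gN_sN_same _ _ _ _ (by omega) (by rw [hrl]; omega)
          · rw [pvTSet_eq _ _ _ _ hi0, pvTGet_eq _ _ _ hi0 hjm0, htoN]
            exact gN_sN_same _ _ _ _ (by omega) (by rw [harl]; omega)
        · intro h
          exfalso; push_cast at h; omega
      · have h1 : pvTGet (pvTSet dp' ((r : Int) + 1) ((m : Int) + 1) (bestV (r + 1) ((m : Int) + 1))) ((r : Int) + 1) j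
            = pvTGet dp' ((r : Int) + 1) j := by
          rw [pvTSet_eq _ _ _ _ hi0, pvTGet_eq _ _ _ hi0 hj0, htoN,
            gN_sN_ne _ _ _ _ _ _ (Or.inr (by omega)), pvTGet_eq dp' _ _ hi0 hj0, htoN]
        have h2 : pvTGet (pvTSet al' ((r : Int) + 1) ((m : Int) + 1) (achoice (r + 1) ((m : Int) + 1))) ((r : Int) + 1) j
            = pvTGet al' ((r : Int) + 1) j := by
          rw [pvTSet_eq _ _ _ _ hi0, pvTGet_eq _ _ _ hi0 hj0, htoN,
            gN_sN_ne _ _ _ _ _ _ (Or.inr (by omega)), pvTGet_eq al' _ _ hi0 hj0, htoN]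
        rw [h1, h2]
        constructor
        · intro hjle
          exact (hrow' j hj0 hjJ).1 (by push_cast at hjle; omega)
        · intro hjgt
          exact (hrow' j hj0 hjJ).2 (by push_cast at hjgt; omega)

def RowsP (J : Int) (r : Nat) (dp al : Array (Array Int)) : Prop :=
  ∀ q : Nat, q < 5 → ∀ j : Int, 0 ≤ j → j ≤ J →
    pvTGet dp (q : Int) j = (if q ≤ r then bestV q j else 0) ∧
    pvTGet al (q : Int) j = (if q ≤ r then achoice q j else 0)

theorem step_r (J : Int) (hJ : 0 ≤ J) (r : Nat) (hr : r < 4) (dp al : Array (Array Int))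
    (hdp : TShape J dp) (hal : TShape J al) (hprop : RowsP J r dp al) :
    ∃ dp' al', pvAOuter J (dp, al) ((r : Int) + 1) = (dp', al') ∧
      TShape J dp' ∧ TShape J al' ∧ RowsP J (r + 1) dp' al' := by
  obtain ⟨dp', al', hfold, hdp', hal', hunch, hrow'⟩ :=
    pvARow_spec r hr J hJ dp al hdp hal
      (fun j' h0 hJ' => by
        rw [(hprop r (by omega) j' h0 hJ').1, if_pos (le_refl r)])
      (fun j' h0 hJ' => by
        have h := hprop (r + 1) (by omega) j' h0 hJ'
        simp only [if_neg (show ¬ (r + 1 ≤ r) by omega)] at h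
        constructor
        · rw [← h.1]; push_cast; rfl
        · rw [← h.2]; push_cast; rfl)
      J.toNat (by omega)
  rw [show ((J.toNat : Int)) = J from by omega] at hfold hrow'
  refine ⟨dp', al', hfold, hdp', hal', ?_⟩
  intro q hq j hj0 hjJ
  have hcast : ((r + 1 : Nat) : Int) = (r : Int) + 1 := by push_cast; ring
  by_cases hqr : q ≤ r
  · have h := hunch q hq (by omega) j hj0 hjJ
    have h2 := hprop q hq j hj0 hjJ
    constructor
    · rw [h.1, h2.1, if_pos hqr, if_pos (show q ≤ r + 1 by omega)]
    · rw [h.2, h2.2, if_pos hqr, if_pos (show q ≤ r + 1 by omega)]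
  · by_cases hqe : q = r + 1
    · subst hqe
      have h := (hrow' j hj0 hjJ).1 hjJ
      constructor
      · rw [hcast, if_pos (le_refl (r + 1))]
        exact h.1
      · rw [hcast, if_pos (le_refl (r + 1))]
        exact h.2
    · have h := hunch q hq (by omega) j hj0 hjJ
      have h2 := hprop q hq j hj0 hjJ
      constructor
      · rw [h.1, h2.1, if_neg hqr, if_neg (show ¬ q ≤ r + 1 by omega)]
      · rw [h.2, h2.2, if_neg hqr, if_neg (show ¬ q ≤ r + 1 by omega)]

theorem gN_zero (w q j : Nat) : gN (Array.replicate 5 (Array.replicate w (0 : Int))) q j = 0 := by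
  unfold gN
  rw [Array.getD_eq_getD_getElem? (xs := Array.replicate 5 (Array.replicate w (0 : Int))),
    Array.getElem?_replicate]
  by_cases hq : q < 5
  · rw [if_pos hq]
    simp only [Option.getD_some]
    rw [Array.getD_eq_getD_getElem?, Array.getElem?_replicate]
    by_cases hj : j < w
    · rw [if_pos hj]
      rfl
    · rw [if_neg hj]
      rfl
  · rw [if_neg hq]
    rfl

theorem init_tables (J : Int) (hJ : 0 ≤ J) :
    TShape J (Array.replicate 5 (Array.replicate (J + 1).toNat (0 : Int))) ∧
    RowsP J 0 (Array.replicate 5 (Array.replicate (J + 1).toNat (0 : Int)))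
      (Array.replicate 5 (Array.replicate (J + 1).toNat (0 : Int))) := by
  constructor
  · constructor
    · simp
    · intro q hq
      rw [Array.getD_eq_getD_getElem? (xs := Array.replicate 5 (Array.replicate (J + 1).toNat (0 : Int))),
        Array.getElem?_replicate, if_pos hq]
      simp
  · intro q hq j hj0 hjJ
    have h : pvTGet (Array.replicate 5 (Array.replicate (J + 1).toNat (0 : Int))) (q : Int) j = 0 := by
      rw [pvTGet_eq _ _ _ (by omega) hj0]
      exact gN_zero _ _ _
    rw [h]
    by_cases hq0 : q = 0
    · subst hq0
      constructor
      · rw [if_pos (le_refl 0)]; rfl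
      · rw [if_pos (le_refl 0)]; rfl
    · constructor
      · rw [if_neg (by omega)]
      · rw [if_neg (by omega)]

theorem tables_spec (J : Int) (hJ : 0 ≤ J) :
    ∃ dp' al', (PySem.List.pyRange 1 5 1).foldl (pvAOuter J)
        (Array.replicate 5 (Array.replicate (J + 1).toNat (0 : Int)),
         Array.replicate 5 (Array.replicate (J + 1).toNat (0 : Int))) = (dp', al') ∧
      TShape J dp' ∧ TShape J al' ∧
      (∀ q : Nat, q < 5 → ∀ j : Int, 0 ≤ j → j ≤ J →
        pvTGet dp' (q : Int) j = bestV q j ∧ pvTGet al' (q : Int) j = achoice q j) := by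
  obtain ⟨hsh, hrp⟩ := init_tables J hJ
  obtain ⟨d1, a1, h1, hd1, ha1, hp1⟩ := step_r J hJ 0 (by omega) _ _ hsh hsh hrp
  obtain ⟨d2, a2, h2, hd2, ha2, hp2⟩ := step_r J hJ 1 (by omega) _ _ hd1 ha1 hp1
  obtain ⟨d3, a3, h3, hd3, ha3, hp3⟩ := step_r J hJ 2 (by omega) _ _ hd2 ha2 hp2
  obtain ⟨d4, a4, h4, hd4, ha4, hp4⟩ := step_r J hJ 3 (by omega) _ _ hd3 ha3 hp3
  rw [show ((0 : Nat) : Int) + 1 = (1 : Int) from by norm_num] at h1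
  rw [show ((1 : Nat) : Int) + 1 = (2 : Int) from by norm_num] at h2
  rw [show ((2 : Nat) : Int) + 1 = (3 : Int) from by norm_num] at h3
  rw [show ((3 : Nat) : Int) + 1 = (4 : Int) from by norm_num] at h4
  refine ⟨d4, a4, ?_, hd4, ha4, ?_⟩
  · rw [pyRange15]
    simp only [List.foldl_cons, List.foldl_nil]
    rw [h1, h2, h3, h4]
  · intro q hq j hj0 hjJ
    have h := hp4 q hq j hj0 hjJ
    rw [if_pos (show q ≤ 3 + 1 by omega), if_pos (show q ≤ 3 + 1 by omega)] at h
    exact h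

theorem drop_set_cons (ds : List Int) (n : Nat) (c : Int) (h : n < ds.length) :
    (ds.set n c).drop n = c :: ds.drop (n + 1) := by
  have h1 : (ds.set n c).drop n = (ds.set n c)[n]'(by simpa using h) :: (ds.set n c).drop (n + 1) :=
    List.drop_eq_getElem_cons (by simpa using h)
  rw [h1, List.getElem_set_self (h := by simpa using h), List.drop_set_of_lt (by omega)]

-- A's backward reconstruction over the achoice table unrolls to distL
theorem reconA (J : Int) (hJ : 0 ≤ J) (alT : Array (Array Int))
    (halprop : ∀ q : Nat, q < 5 → ∀ j : Int, 0 ≤ j → j ≤ J → pvTGet alT (q : Int) j = achoice q j) :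
    ∀ n : Nat, n ≤ 4 → ∀ (ds : List Int), ds.length = 4 → ∀ b : Int, 0 ≤ b → b ≤ J →
      ((PySem.List.pyRange (n : Int) 0 (-1)).foldl
        (fun (s : List Int × Int) i =>
          let d := pvTGet alT i s.2
          (s.1.set (i - 1).toNat d, s.2 - PySem.Int.floordiv d 40)) (ds, b)).1
        = distL n b ++ ds.drop n := by
  intro n
  induction n with
  | zero =>
    intro _ ds hds b hb0 hbJ
    rw [PySem.List.pyRange_neg_one_eq_nil (by norm_num)]
    simp [distL]
  | succ n ih =>
    intro hn ds hds b hb0 hbJ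
    have hcons : PySem.List.pyRange (((n : Nat) + 1 : Nat) : Int) 0 (-1)
        = ((n : Int) + 1) :: PySem.List.pyRange ((n : Int)) 0 (-1) := by
      have := PySem.List.pyRange_neg_one_cons (a := (n : Int) + 1) (b := 0) (by omega)
      push_cast
      push_cast at this
      rw [this]
      norm_num
    have hread : pvTGet alT ((n : Int) + 1) b = achoice (n + 1) b := by
      have := halprop (n + 1) (by omega) b hb0 hbJ
      push_cast at this
      exact this
    have hidx : (((n : Int) + 1) - 1).toNat = n := by omega
    rw [hcons]
    simp only [List.foldl_cons]
    rw [hread, hidx]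
    rcases choice_spec n b with ⟨_, hc, hd⟩ | ⟨_, k, hc, hd, hk0, hkb⟩
    · -- tie: stored cost 0, budget unchanged
      rw [hc, floordiv_zero40, sub_zero]
      rw [ih (by omega) (ds.set n 0) (by rw [List.length_set]; exact hds) b hb0 hbJ]
      rw [hd, drop_set_cons ds n 0 (by omega)]
      simp
    · -- improvement: stored (k+1)*40, budget drops by k+1
      rw [hc, show PySem.Int.floordiv ((k + 1) * 40) 40 = k + 1 from floordiv_mul40 (k + 1)]
      rw [show b - (k + 1) = b - k - 1 by ring]
      rw [ih (by omega) (ds.set n ((k + 1) * 40)) (by rw [List.length_set]; exact hds)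
        (b - k - 1) (by omega) (by omega)]
      rw [hd, drop_set_cons ds n ((k + 1) * 40) (by omega)]
      simp

-- ===== B-side: the forward solution-carrying fold computes (bestV, distL) =====

def InvB (units : Int) (n : Nat) (sol : List (Int × List Int)) : Prop :=
  sol.length = (units + 1).toNat ∧
  ∀ b : Int, 0 ≤ b → b ≤ units → altCell sol b = (bestV n b, distL n b)

theorem invB_init (units : Int) (h : 0 ≤ units) :
    InvB units 0 (PySem.List.pyRepeat [((0 : Int), ([] : List Int))] (units + 1)) := by
  rw [PySem.List.pyRepeat_singleton]
  constructor
  · rw [List.length_replicate]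
  · intro b hb0 hbu
    unfold altCell
    rw [PySem.List.pyGetD_eq_getElem _ _ hb0 (by rw [List.length_replicate]; push_cast; omega)]
    rw [List.getElem_replicate]
    rfl

theorem invB_step (units : Int) (h0 : 0 ≤ units) (n : Nat) (sol : List (Int × List Int))
    (hinv : InvB units n sol) :
    InvB units (n + 1)
      ((PySem.List.pyRange 0 (units + 1) 1).map (fun b => altBestOption sol (n : Int) b)) := by
  constructor
  · rw [List.length_map, PySem.List.length_pyRange_one]
    omega
  · intro b hb0 hbu
    unfold altCell
    rw [PySem.List.pyGetD_map_pyRange_of_nonneg _ _ _ _ hb0 (by omega)]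
    have hcellb : altCell sol b = (bestV n b, distL n b) := hinv.2 b hb0 hbu
    -- replace the body's cell reads by their invariant values (valid for every k in the range)
    have hcong := PySem.List.foldl_congr_mem (PySem.List.pyRange 0 5 1)
      (fun (s : Int × List Int) k =>
        if k + 1 ≤ b then
          if s.1 < pvGet2 pvIncome (n : Int) k + (altCell sol (b - k - 1)).1 then
            (pvGet2 pvIncome (n : Int) k + (altCell sol (b - k - 1)).1,
             (altCell sol (b - k - 1)).2 ++ [(k + 1) * 40])
          else s
        else s)
      (fun (s : Int × List Int) k =>
        if k + 1 ≤ b then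
          if s.1 < pvGet2 pvIncome (n : Int) k + bestV n (b - k - 1) then
            (pvGet2 pvIncome (n : Int) k + bestV n (b - k - 1), distL n (b - k - 1) ++ [(k + 1) * 40])
          else s
        else s)
      ((altCell sol b).1, (altCell sol b).2 ++ [0])
      (by
        intro acc k hk
        by_cases hkb : k + 1 ≤ b
        · have hc : altCell sol (b - k - 1) = (bestV n (b - k - 1), distL n (b - k - 1)) := by
            rw [PySem.List.mem_pyRange_one] at hk
            exact hinv.2 (b - k - 1) (by omega) (by omega)
          simp only [if_pos hkb, hc]
        · simp only [if_neg hkb])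
    unfold altBestOption
    rw [hcong, hcellb]
    -- now this is exactly the pair fold defining (bestV (n+1) b, distL (n+1) b)
    have hfst := (pairfold_spec (fun k => k + 1 ≤ b)
      (fun k => pvGet2 pvIncome (n : Int) k + bestV n (b - k - 1))
      (fun k => distL n (b - k - 1) ++ [(k + 1) * 40]) (PySem.List.pyRange 0 5 1)
      (bestV n b) (distL n b ++ [0])).1
    rw [← bestV_succ] at hfst
    apply Prod.ext
    · exact hfst
    · simp only [distL]

theorem alt_eval (budget : Int) (hb : 0 ≤ budget) :
    optimal_distribution_alt budget
      = (bestV 4 (PySem.Int.floordiv budget 40), distL 4 (PySem.Int.floordiv budget 40)) := by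
  have hJ : 0 ≤ PySem.Int.floordiv budget 40 := by
    rw [PySem.Int.floordiv_eq_ediv_of_pos (by norm_num)]
    exact Int.ediv_nonneg hb (by norm_num)
  set units := PySem.Int.floordiv budget 40 with hu
  have i0 := invB_init units hJ
  have i1 := invB_step units hJ 0 _ i0
  have i2 := invB_step units hJ 1 _ i1
  have i3 := invB_step units hJ 2 _ i2
  have i4 := invB_step units hJ 3 _ i3
  show altCell ((PySem.List.pyRange 0 4 1).foldl
    (fun sol i => (PySem.List.pyRange 0 (units + 1) 1).map (fun b => altBestOption sol i b))
    (PySem.List.pyRepeat [((0 : Int), ([] : List Int))] (units + 1))) units = _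
  rw [pyRange04]
  simp only [List.foldl_cons, List.foldl_nil]
  have hres := i4.2 units hJ (le_refl units)
  rw [show ((0 : Nat) : Int) = (0 : Int) from rfl, show ((1 : Nat) : Int) = (1 : Int) from rfl,
    show ((2 : Nat) : Int) = (2 : Int) from rfl, show ((3 : Nat) : Int) = (3 : Int) from rfl] at hres
  exact hres

theorem main_eq (budget : Int) (hb : 0 ≤ budget) :
    optimal_distribution budget = optimal_distribution_alt budget := by
  have hJ : 0 ≤ PySem.Int.floordiv budget 40 := by
    rw [PySem.Int.floordiv_eq_ediv_of_pos (by norm_num)]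
    exact Int.ediv_nonneg hb (by norm_num)
  obtain ⟨dp', al', hst, hdp', hal', hprop⟩ := tables_spec (PySem.Int.floordiv budget 40) hJ
  rw [alt_eval budget hb]
  simp only [optimal_distribution]
  rw [hst]
  have hfst : pvTGet dp' 4 (PySem.Int.floordiv budget 40)
      = bestV 4 (PySem.Int.floordiv budget 40) := by
    have := (hprop 4 (by omega) (PySem.Int.floordiv budget 40) hJ (le_refl _)).1
    rw [show (((4 : Nat)) : Int) = (4 : Int) from by norm_num] at this
    exact this
  rw [hfst]
  have hrec := reconA (PySem.Int.floordiv budget 40) hJ al'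
    (fun q hq j hj0 hjJ => (hprop q hq j hj0 hjJ).2)
    4 (le_refl 4) (List.replicate 4 (0 : Int)) (by rw [List.length_replicate])
    (PySem.Int.floordiv budget 40) hJ (le_refl _)
  rw [show (((4 : Nat)) : Int) = (4 : Int) from by norm_num] at hrec
  rw [hrec]
  simp

-- ===== VERDICT (by name: the statement is the Claim_ definition above) =====
theorem optimal_distribution_spec : Claim_equal_optimal_distribution := by
  unfold Claim_equal_optimal_distribution
  intro budget _ hpre
  unfold Spec_optimal_distribution
  exact main_eq budget hpre
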